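-- pv_equiv track=rewrite | github.com/ZaraGiraffe/advance-python | matrix.py | find_colums
-- ===== SOURCE A (Python) =====
-- def find_colums(n: int, matrix: list) -> list:
--     res = []
--     for i in range(len(matrix)):
--         for j in range(len(matrix[i])):
--             if matrix[i][j] == str(n):
--                 res.append(j)
--                 break
--     res = set(res)
--     res = list(res)
--     return sorted(res)
-- ===== SOURCE B (Python) =====
-- def find_colums(n: int, matrix: list) -> list:
--     # Column-major sweep: visit columns left to right, keeping the rows that
--     # have not yet met str(n); a column enters the result the moment some
--     # still-pending row matches there, so the result comes out already sorted.
--     s = str(n)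
--     pending = list(range(len(matrix)))
--     width = 0
--     for row in matrix:
--         width = max(width, len(row))
--     res = []
--     for j in range(width):
--         hit = [i for i in pending if j < len(matrix[i]) and matrix[i][j] == s]
--         if hit:
--             res.append(j)
--             pending = [i for i in pending if i not in hit]
--     return res
-- ===== Notes on version B (the rewrite author's own statement) =====
-- stated objective: alternative
-- what changed: Row-major scan with per-row break plus a set-then-sort is replaced by a column-major sweep over a pending-rows list that emits each qualifying column once, already in increasing order, so no set or sort is needed.
import Mathlib
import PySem

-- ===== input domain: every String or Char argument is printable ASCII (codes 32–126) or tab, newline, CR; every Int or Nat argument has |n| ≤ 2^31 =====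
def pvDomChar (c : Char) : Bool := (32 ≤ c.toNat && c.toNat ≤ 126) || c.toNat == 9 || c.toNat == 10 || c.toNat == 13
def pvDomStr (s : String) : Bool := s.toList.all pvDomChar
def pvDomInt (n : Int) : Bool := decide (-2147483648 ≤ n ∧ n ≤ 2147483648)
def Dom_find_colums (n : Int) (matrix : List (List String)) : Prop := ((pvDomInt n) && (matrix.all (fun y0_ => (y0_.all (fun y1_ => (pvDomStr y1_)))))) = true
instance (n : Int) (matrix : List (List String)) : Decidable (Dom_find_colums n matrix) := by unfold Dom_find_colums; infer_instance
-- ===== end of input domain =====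

-- B replaces A's row-major scan-with-break plus set-then-sort by a column-major sweep over a
-- pending-rows list that emits each qualifying column once, already in increasing order (alternative decomposition).

-- ===== PORT A =====
-- inner loop 'for j in range(len(matrix[i])): if matrix[i][j] == str(n): res.append(j); break'
def pvScanA (s : String) (row : List String) (res : List Int) : List Int → List Int
  | [] => res
  | j :: js => if PySem.List.pyGetD row j "" = s then res ++ [j] else pvScanA s row res js

def find_colums (n : Int) (matrix : List (List String)) : List Int :=
  let res := (PySem.List.pyRange 0 (matrix.length : Int)).foldl
    (fun res i =>
      pvScanA (PySem.Int.toStr n) (PySem.List.pyGetD matrix i []) res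
        (PySem.List.pyRange 0 ((PySem.List.pyGetD matrix i []).length : Int))) []
  PySem.List.sorted (PySem.Set.ofList res) (fun x => x)

-- ===== PORT B =====
def find_colums_alt (n : Int) (matrix : List (List String)) : List Int :=
  let s := PySem.Int.toStr n
  let pending0 := PySem.List.pyRange 0 (matrix.length : Int)
  let width := matrix.foldl (fun w row => max w ((row.length : Int))) 0
  let st := (PySem.List.pyRange 0 width).foldl
    (fun (st : List Int × List Int) j =>
      let hit := st.1.filter (fun i =>
        decide (j < ((PySem.List.pyGetD matrix i []).length : Int)) &&
        (PySem.List.pyGetD (PySem.List.pyGetD matrix i []) j "" == s))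
      if hit.isEmpty then st
      else (st.1.filter (fun i => !hit.contains i), st.2 ++ [j]))
    (pending0, [])
  st.2

-- ===== PRECONDITION & SPEC =====
def Spec_find_colums (n : Int) (matrix : List (List String)) (out : List Int) : Prop := out = find_colums_alt n matrix
instance (n : Int) (matrix : List (List String)) (out : List Int) : Decidable (Spec_find_colums n matrix out) := by unfold Spec_find_colums; infer_instance

-- ===== CLAIM (what is proved, stated in full; the proofs are below) =====
def Claim_equal_find_colums : Prop := ∀ (n : Int) (matrix : List (List String)), Dom_find_colums n matrix → Spec_find_colums n matrix (find_colums n matrix)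

-- ===== LEMMAS AND PROOFS =====

-- first-match column of a row, and the list of first-match columns of all rows
def pvFm (s : String) (row : List String) : Option Nat := row.findIdx? (· == s)
def pvF (s : String) (matrix : List (List String)) : List Int :=
  matrix.flatMap (fun row => (pvFm s row).elim [] (fun j => [(j : Int)]))
-- row i is still pending before column c: no match strictly before c
def pvPend (s : String) (matrix : List (List String)) (c : Int) (i : Int) : Bool :=
  match pvFm s (PySem.List.pyGetD matrix i []) with
  | none => true
  | some j => decide (c ≤ (j : Int))
-- the per-row test of B's inner comprehension at column j
def pvCond (s : String) (matrix : List (List String)) (j : Int) (i : Int) : Bool :=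
  decide (j < ((PySem.List.pyGetD matrix i []).length : Int)) &&
  (PySem.List.pyGetD (PySem.List.pyGetD matrix i []) j "" == s)
-- B's loop body (definitionally the lambda inside find_colums_alt)
def pvStep (s : String) (matrix : List (List String)) (st : List Int × List Int) (j : Int) :
    List Int × List Int :=
  let hit := st.1.filter (pvCond s matrix j)
  if hit.isEmpty then st else (st.1.filter (fun i => !hit.contains i), st.2 ++ [j])

theorem pvScanA_eq (s : String) (row : List String) :
    ∀ (k : Nat) (res : List Int), pvScanA s row res (PySem.List.pyRange (k : Int) (row.length : Int)) =
      res ++ (((row.drop k).findIdx? (· == s)).elim [] (fun j => [((k + j : Nat) : Int)])) := by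
  intro k
  induction hm : row.length - k generalizing k with
  | zero =>
    intro res
    have hk : row.length ≤ k := by omega
    rw [PySem.List.pyRange_one_eq_nil (by exact_mod_cast hk)]
    rw [List.drop_eq_nil_of_le hk]
    simp [pvScanA]
  | succ m ih =>
    intro res
    have hk : k < row.length := by omega
    rw [PySem.List.pyRange_one_cons (by exact_mod_cast hk)]
    have hdrop : row.drop k = row[k] :: row.drop (k + 1) := (List.drop_eq_getElem_cons hk)
    simp only [pvScanA]
    rw [PySem.List.pyGetD_natCast, List.getD_eq_getElem _ _ hk]
    by_cases h : row[k] = s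
    · simp [h, hdrop, List.findIdx?_cons]
    · have : ((k : Int) + 1) = ((k + 1 : Nat) : Int) := by push_cast; ring
      rw [this, ih (k+1) (by omega)]
      simp only [hdrop, List.findIdx?_cons]
      have hb : (row[k] == s) = false := by simp [h]
      simp only [hb, Bool.false_eq_true, if_false, h]
      cases hfi : (row.drop (k+1)).findIdx? (· == s) with
      | none => simp
      | some j => simp; ring

theorem portA_char (n : Int) (matrix : List (List String)) :
    find_colums n matrix =
      PySem.List.sorted (PySem.Set.ofList (pvF (PySem.Int.toStr n) matrix)) (fun x => x) := by
  unfold find_colums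
  rw [PySem.List.foldl_pyRange_zero_pyGetD' matrix []
      (f := fun res row => pvScanA (PySem.Int.toStr n) row res (PySem.List.pyRange 0 ((row.length : Int)))) []]
  have hf : (fun (res : List Int) (row : List String) => pvScanA (PySem.Int.toStr n) row res (PySem.List.pyRange 0 ((row.length : Int)))) =
      (fun res row => res ++ ((pvFm (PySem.Int.toStr n) row).elim [] (fun j => [(j : Int)]))) := by
    funext res row
    have := pvScanA_eq (PySem.Int.toStr n) row 0 res
    simpa [pvFm] using this
  rw [hf, PySem.List.foldl_append_eq_flatMap]
  simp [pvF]

-- max-width facts: the running maximum dominates the seed and every row length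
theorem pvW_facts (matrix : List (List String)) :
    ∀ (init : Int), init ≤ matrix.foldl (fun w row => max w ((row.length : Int))) init ∧
      ∀ row ∈ matrix, (row.length : Int) ≤ matrix.foldl (fun w row => max w ((row.length : Int))) init := by
  induction matrix with
  | nil => intro init; simp
  | cons r t ih =>
    intro init
    refine ⟨le_trans (le_max_left _ _) (ih (max init _)).1, ?_⟩
    intro row hrow
    rcases List.mem_cons.1 hrow with h | h
    · subst h; exact le_trans (le_max_right _ _) (ih (max init _)).1
    · exact (ih (max init _)).2 row h

-- B's test at column c, for a still-pending row: it fires iff c is the row's first match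
theorem pvCond_iff (s : String) (matrix : List (List String)) (c i : Int) (hc : 0 ≤ c)
    (hp : pvPend s matrix c i = true) :
    pvCond s matrix c i = true ↔ pvFm s (PySem.List.pyGetD matrix i []) = some c.toNat := by
  set row := PySem.List.pyGetD matrix i [] with hrow
  constructor
  · intro h
    unfold pvCond at h
    rw [Bool.and_eq_true] at h
    obtain ⟨h1b, h2⟩ := h
    have h1 : c < (row.length : Int) := by rw [← hrow] at h1b; exact of_decide_eq_true h1b
    rw [← hrow] at h2
    have hlt : c.toNat < row.length := by omega
    have hcast : c = ((c.toNat : Nat) : Int) := by omega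
    rw [hcast, PySem.List.pyGetD_natCast, List.getD_eq_getElem _ _ hlt] at h2
    cases hfm : pvFm s row with
    | none =>
      exfalso
      have := (List.findIdx?_eq_none_iff).1 hfm row[c.toNat] (List.getElem_mem hlt)
      simp [this] at h2
    | some j =>
      have hspec := (List.findIdx?_eq_some_iff_getElem).1 hfm
      rcases hspec with ⟨hj, hpj, hmin⟩
      have hjle : j ≤ c.toNat := by
        by_contra hgt
        exact (hmin c.toNat (by omega)) h2
      have hge : c ≤ (j : Int) := by
        rw [pvPend, hfm] at hp; exact of_decide_eq_true hp
      have : j = c.toNat := by omega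
      exact congrArg some this
  · intro hfm
    have hspec := (List.findIdx?_eq_some_iff_getElem).1 hfm
    rcases hspec with ⟨hj, hpj, hmin⟩
    have hcast : c = ((c.toNat : Nat) : Int) := by omega
    unfold pvCond
    rw [← hrow, Bool.and_eq_true]
    constructor
    · exact decide_eq_true (by omega)
    · rw [hcast, PySem.List.pyGetD_natCast, List.getD_eq_getElem _ _ hj]; exact hpj

-- c is a collected column iff some row first-matches at c  (0 ≤ c)
theorem pvF_mem (s : String) (matrix : List (List String)) (c : Int) (hc : 0 ≤ c) :
    c ∈ pvF s matrix ↔ ∃ row ∈ matrix, pvFm s row = some c.toNat := by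
  unfold pvF
  rw [List.mem_flatMap]
  constructor
  · rintro ⟨row, hrow, hmem⟩
    cases hfm : pvFm s row with
    | none => rw [hfm] at hmem; simp at hmem
    | some j =>
      rw [hfm] at hmem; simp at hmem
      exact ⟨row, hrow, by rw [hfm]; congr 1; omega⟩
  · rintro ⟨row, hrow, hfm⟩
    exact ⟨row, hrow, by rw [hfm]; simp; omega⟩

-- an Int-indexed row of the matrix is a member, and conversely
theorem pvRow_bridge (matrix : List (List String)) (Q : List String → Prop) :
    (∃ i ∈ PySem.List.pyRange 0 (matrix.length : Int), Q (PySem.List.pyGetD matrix i [])) ↔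
      ∃ row ∈ matrix, Q row := by
  constructor
  · rintro ⟨i, hi, hQ⟩
    rw [PySem.List.mem_pyRange_one] at hi
    have hlt : i.toNat < matrix.length := by omega
    have hcast : i = ((i.toNat : Nat) : Int) := by omega
    rw [hcast, PySem.List.pyGetD_natCast, List.getD_eq_getElem _ _ hlt] at hQ
    exact ⟨matrix[i.toNat], List.getElem_mem hlt, hQ⟩
  · rintro ⟨row, hrow, hQ⟩
    rcases List.mem_iff_getElem.1 hrow with ⟨k, hk, hke⟩
    refine ⟨(k : Int), PySem.List.mem_pyRange_one.2 ⟨by omega, by omega⟩, ?_⟩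
    rw [PySem.List.pyGetD_natCast, List.getD_eq_getElem _ _ hk, hke]
    exact hQ

-- the loop invariant of B's column sweep
theorem pvLoop (s : String) (matrix : List (List String)) (W : Int)
    (hWub : ∀ row ∈ matrix, (row.length : Int) ≤ W) :
    ∀ (c : Int), 0 ≤ c → c ≤ W →
    (PySem.List.pyRange c W).foldl (pvStep s matrix)
      ((PySem.List.pyRange 0 (matrix.length : Int)).filter (pvPend s matrix c),
       (PySem.List.pyRange 0 c).filter (fun j => (pvF s matrix).contains j))
    = ((PySem.List.pyRange 0 (matrix.length : Int)).filter (pvPend s matrix W),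
       (PySem.List.pyRange 0 W).filter (fun j => (pvF s matrix).contains j)) := by
  intro c
  induction hm : (W - c).toNat generalizing c with
  | zero =>
    intro hc hcW
    have : c = W := by omega
    subst this
    rw [PySem.List.pyRange_one_eq_nil le_rfl]
    rfl
  | succ m ih =>
    intro hc hcW
    have hlt : c < W := by omega
    rw [PySem.List.pyRange_one_cons hlt, List.foldl_cons]
    have hstep : pvStep s matrix
        ((PySem.List.pyRange 0 (matrix.length : Int)).filter (pvPend s matrix c),
         (PySem.List.pyRange 0 c).filter (fun j => (pvF s matrix).contains j)) c
      = ((PySem.List.pyRange 0 (matrix.length : Int)).filter (pvPend s matrix (c+1)),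
         (PySem.List.pyRange 0 (c+1)).filter (fun j => (pvF s matrix).contains j)) := by
      set P := PySem.List.pyRange 0 (matrix.length : Int) with hP
      by_cases hcF : c ∈ pvF s matrix
      · -- some pending row first-matches at c
        rcases (pvF_mem s matrix c hc).1 hcF with ⟨row, hrow, hfm⟩
        rcases (pvRow_bridge matrix (fun r => pvFm s r = some c.toNat)).2 ⟨row, hrow, hfm⟩
          with ⟨i0, hi0P, hi0fm⟩
        have hi0pend : pvPend s matrix c i0 = true := by
          rw [pvPend, hi0fm]; exact decide_eq_true (by omega)
        have hi0cond : pvCond s matrix c i0 = true := (pvCond_iff s matrix c i0 hc hi0pend).2 hi0fm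
        have hi0hit : i0 ∈ (P.filter (pvPend s matrix c)).filter (pvCond s matrix c) :=
          List.mem_filter.2 ⟨List.mem_filter.2 ⟨hi0P, hi0pend⟩, hi0cond⟩
        have hne : ((P.filter (pvPend s matrix c)).filter (pvCond s matrix c)).isEmpty = false := by
          rcases h : ((P.filter (pvPend s matrix c)).filter (pvCond s matrix c)).isEmpty with _ | _
          · rfl
          · exfalso; rw [List.isEmpty_iff] at h; rw [h] at hi0hit; exact (List.not_mem_nil) hi0hit
        unfold pvStep
        simp only [hne, Bool.false_eq_true, if_false]
        refine Prod.ext ?_ ?_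
        · -- pending update: exactly the rows first-matching at c leave
          rw [List.filter_filter]
          apply List.filter_congr
          intro i hiP
          cases hfmi : pvFm s (PySem.List.pyGetD matrix i []) with
          | none =>
            have hpc : pvPend s matrix c i = true := by rw [pvPend, hfmi]
            have hpc1 : pvPend s matrix (c+1) i = true := by rw [pvPend, hfmi]
            have hnin : ((P.filter (pvPend s matrix c)).filter (pvCond s matrix c)).contains i = false := by
              rcases h : ((P.filter (pvPend s matrix c)).filter (pvCond s matrix c)).contains i with _ | _
              · rfl
              · exfalso
                have hmem := List.contains_iff_mem.1 h
                have hcnd := (List.mem_filter.1 hmem).2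
                have hpnd := (List.mem_filter.1 (List.mem_filter.1 hmem).1).2
                have := (pvCond_iff s matrix c i hc hpnd).1 hcnd
                rw [hfmi] at this; simp at this
            rw [hnin, hpc, hpc1]; rfl
          | some j =>
            have hpc : pvPend s matrix c i = decide (c ≤ (j : Int)) := by rw [pvPend, hfmi]
            have hpc1 : pvPend s matrix (c+1) i = decide (c+1 ≤ (j : Int)) := by rw [pvPend, hfmi]
            by_cases hjc : (j : Int) < c
            · rw [hpc, hpc1]
              have h1 : decide (c ≤ (j : Int)) = false := decide_eq_false (by omega)
              have h2 : decide (c+1 ≤ (j : Int)) = false := decide_eq_false (by omega)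
              rw [h1, h2, Bool.and_false]
            · by_cases hjeq : (j : Int) = c
              · -- row i first-matches exactly at c: it is in hit
                have hpnd : pvPend s matrix c i = true := by
                  rw [hpc]; exact decide_eq_true (by omega)
                have hjnat : j = c.toNat := by omega
                have hcnd : pvCond s matrix c i = true :=
                  (pvCond_iff s matrix c i hc hpnd).2 (by rw [hfmi, hjnat])
                have hin : ((P.filter (pvPend s matrix c)).filter (pvCond s matrix c)).contains i = true :=
                  List.contains_iff_mem.2
                    (List.mem_filter.2 ⟨List.mem_filter.2 ⟨hiP, hpnd⟩, hcnd⟩)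
                rw [hin, hpc, hpc1]
                have h2 : decide (c+1 ≤ (j : Int)) = false := decide_eq_false (by omega)
                rw [h2]; rfl
              · -- first match strictly after c: stays pending
                have hnin : ((P.filter (pvPend s matrix c)).filter (pvCond s matrix c)).contains i = false := by
                  rcases h : ((P.filter (pvPend s matrix c)).filter (pvCond s matrix c)).contains i with _ | _
                  · rfl
                  · exfalso
                    have hmem := List.contains_iff_mem.1 h
                    have hcnd := (List.mem_filter.1 hmem).2
                    have hpnd := (List.mem_filter.1 (List.mem_filter.1 hmem).1).2
                    have := (pvCond_iff s matrix c i hc hpnd).1 hcnd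
                    rw [hfmi] at this
                    have : j = c.toNat := Option.some.inj this
                    omega
                rw [hnin, hpc, hpc1]
                have h1 : decide (c ≤ (j : Int)) = true := decide_eq_true (by omega)
                have h2 : decide (c+1 ≤ (j : Int)) = true := decide_eq_true (by omega)
                rw [h1, h2]; rfl
        · -- result update: c is appended, and the filtered range gains c
          rw [PySem.List.pyRange_one_succ_right hc, List.filter_append]
          simp [hcF]
      · -- no pending row matches at c: nothing happens
        have hnil : (P.filter (pvPend s matrix c)).filter (pvCond s matrix c) = [] := by
          rw [List.filter_eq_nil_iff]
          intro i hi hcnd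
          have hpnd := (List.mem_filter.1 hi).2
          have hiP := (List.mem_filter.1 hi).1
          have hfmi := (pvCond_iff s matrix c i hc hpnd).1 hcnd
          exact hcF ((pvF_mem s matrix c hc).2
            ((pvRow_bridge matrix (fun r => pvFm s r = some c.toNat)).1 ⟨i, hiP, hfmi⟩))
        unfold pvStep
        simp only [hnil, List.isEmpty_nil, if_true]
        refine Prod.ext ?_ ?_
        · apply List.filter_congr
          intro i hiP
          cases hfmi : pvFm s (PySem.List.pyGetD matrix i []) with
          | none => rw [pvPend, pvPend, hfmi]
          | some j =>
            rw [pvPend, pvPend, hfmi]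
            by_cases hjeq : (j : Int) = c
            · exfalso
              have hjnat : j = c.toNat := by omega
              exact hcF ((pvF_mem s matrix c hc).2
                ((pvRow_bridge matrix (fun r => pvFm s r = some c.toNat)).1
                  ⟨i, hiP, by rw [hfmi, hjnat]⟩))
            · simp only [decide_eq_decide]; omega
        · rw [PySem.List.pyRange_one_succ_right hc, List.filter_append]
          simp [hcF]
    rw [hstep]
    exact ih (c+1) (by omega) (by omega) (by omega)

theorem portB_char (n : Int) (matrix : List (List String)) :
    find_colums_alt n matrix =
      (PySem.List.pyRange 0 (matrix.foldl (fun w row => max w ((row.length : Int))) 0)).filter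
        (fun j => (pvF (PySem.Int.toStr n) matrix).contains j) := by
  have hW0 : (0 : Int) ≤ matrix.foldl (fun w row => max w ((row.length : Int))) 0 :=
    (pvW_facts matrix 0).1
  have hWub := (pvW_facts matrix 0).2
  have h0 : find_colums_alt n matrix =
      ((PySem.List.pyRange 0 (matrix.foldl (fun w row => max w ((row.length : Int))) 0)).foldl
        (pvStep (PySem.Int.toStr n) matrix)
        (PySem.List.pyRange 0 (matrix.length : Int), [])).2 := rfl
  rw [h0]
  have hpend0 : (PySem.List.pyRange 0 (matrix.length : Int)).filter
      (pvPend (PySem.Int.toStr n) matrix 0) = PySem.List.pyRange 0 (matrix.length : Int) := by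
    apply List.filter_eq_self.2
    intro i _
    unfold pvPend
    cases pvFm (PySem.Int.toStr n) (PySem.List.pyGetD matrix i []) with
    | none => rfl
    | some j => exact decide_eq_true (by omega)
  have hres0 : ((PySem.List.pyRange 0 (0:Int)).filter
      (fun j => (pvF (PySem.Int.toStr n) matrix).contains j)) = [] := by
    rw [PySem.List.pyRange_one_eq_nil le_rfl]; rfl
  rw [← hpend0, ← hres0,
    pvLoop (PySem.Int.toStr n) matrix _ hWub 0 le_rfl hW0]

theorem pvF_bounds (s : String) (matrix : List (List String))
    (W : Int) (hWub : ∀ row ∈ matrix, (row.length : Int) ≤ W) :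
    ∀ a ∈ pvF s matrix, 0 ≤ a ∧ a < W := by
  intro a ha
  unfold pvF at ha
  rcases List.mem_flatMap.1 ha with ⟨row, hrow, hmem⟩
  cases hfm : pvFm s row with
  | none => rw [hfm] at hmem; simp at hmem
  | some j =>
    rw [hfm] at hmem; simp at hmem
    subst hmem
    have hj : j < row.length := by
      rcases (List.findIdx?_eq_some_iff_getElem).1 hfm with ⟨h, _, _⟩; exact h
    have := hWub row hrow
    constructor <;> omega

-- sorted(set(F)) is the width-range filtered to the members of F
theorem final_eq (s : String) (matrix : List (List String))
    (W : Int) (hWub : ∀ row ∈ matrix, (row.length : Int) ≤ W) :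
    PySem.List.sorted (PySem.Set.ofList (pvF s matrix)) (fun x => x) =
      (PySem.List.pyRange 0 W).filter (fun j => (pvF s matrix).contains j) := by
  apply PySem.List.sorted_eq_of_perm_of_pairwise_lt
  · rw [List.perm_ext_iff_of_nodup
      (((PySem.List.nodup_pyRange_one 0 W)).filter _) (PySem.Set.nodup_ofList _)]
    intro a
    rw [List.mem_filter, PySem.Set.mem_ofList, PySem.List.mem_pyRange_one,
      List.contains_iff_mem]
    constructor
    · rintro ⟨_, h⟩; exact h
    · intro h
      exact ⟨(pvF_bounds s matrix W hWub a h : _), h⟩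
  · exact (PySem.List.pairwise_lt_pyRange_one 0 W).filter _

-- ===== VERDICT (by name: the statement is the Claim_ definition above) =====
theorem find_colums_spec : Claim_equal_find_colums := by
  intro n matrix _
  unfold Spec_find_colums
  rw [portA_char, portB_char,
    final_eq (PySem.Int.toStr n) matrix _ (pvW_facts matrix 0).2]
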